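-- pv_equiv track=rewrite | github.com/pypi-data/pypi-mirror-385 | packages/coffee-maker/coffee_maker-0.1.4-py3-none-any.whl/coffee_maker/skills/code_analysis/security_audit.py | _count_external_deps
-- ===== SOURCE A (Python) =====
-- from typing import Any, Dict, List
--
-- def _count_external_deps(deps: Dict) -> int:
--     """Count external (non-standard library) dependencies."""
--     stdlib_mods = {
--         "os",
--         "sys",
--         "re",
--         "json",
--         "ast",
--         "pathlib",
--         "collections",
--         "defaultdict",
--         "typing",
--     }
--     return len([d for d in deps.keys() if d not in stdlib_mods])
-- ===== SOURCE B (Python) =====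
-- def _count_external_deps(deps) -> int:
--     """Count external (non-standard library) dependencies."""
--     stdlib_mods = {
--         "os",
--         "sys",
--         "re",
--         "json",
--         "ast",
--         "pathlib",
--         "collections",
--         "defaultdict",
--         "typing",
--     }
--     present = 0
--     for m in stdlib_mods:
--         if m in deps:
--             present += 1
--     return len(deps) - present
-- ===== Notes on version B (the rewrite author's own statement) =====
-- stated objective: alternative
-- what changed: B never traverses deps: it loops over the fixed 9-element stdlib set, counting via dict lookups how many stdlib names are keys of deps, and returns len(deps) minus that count, instead of filtering every key of deps; correct because dict keys are unique, so the stdlib names found among the keys are exactly the keys removed by A's filter.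
import Mathlib
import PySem

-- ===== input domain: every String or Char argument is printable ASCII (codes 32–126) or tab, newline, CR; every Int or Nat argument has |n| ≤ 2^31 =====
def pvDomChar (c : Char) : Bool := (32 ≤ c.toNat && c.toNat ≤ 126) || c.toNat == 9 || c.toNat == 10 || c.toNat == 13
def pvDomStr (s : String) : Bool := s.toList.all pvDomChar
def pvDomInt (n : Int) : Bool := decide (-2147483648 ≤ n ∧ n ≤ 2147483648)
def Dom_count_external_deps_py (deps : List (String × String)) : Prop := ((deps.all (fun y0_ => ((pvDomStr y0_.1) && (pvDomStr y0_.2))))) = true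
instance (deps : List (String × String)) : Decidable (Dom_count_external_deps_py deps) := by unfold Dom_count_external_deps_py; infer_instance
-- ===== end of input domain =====

-- B never traverses deps: it loops over the fixed 9-element stdlib set counting names present as dict keys and returns len(deps) minus that count; objective: alternative.


-- the stdlib_mods set literal, shared verbatim by both Pythons
def pvStdlibMods : PySem.Set String :=
  PySem.Set.ofList ["os", "sys", "re", "json", "ast", "pathlib", "collections", "defaultdict", "typing"]

-- ===== PORT A =====
-- len([d for d in deps.keys() if d not in stdlib_mods])
def count_external_deps_py (deps : List (String × String)) : Int :=
  (((deps.map (·.1)).filter (fun d => !(pvStdlibMods.contains d))).length : Int)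

-- ===== PORT B =====
-- present = 0; for m in stdlib_mods: if m in deps: present += 1; return len(deps) - present
def count_external_deps_py_alt (deps : List (String × String)) : Int :=
  let present : Int :=
    pvStdlibMods.foldl (fun c m => if (PySem.Dict.mk deps).contains m then c + 1 else c) 0
  (deps.length : Int) - present

-- ===== PRECONDITION & SPEC =====
-- Pre_ excludes association lists with duplicate keys: a Python dict cannot contain them, so no dict argument of A corresponds to such a list.
def Pre_count_external_deps_py (deps : List (String × String)) : Prop := (deps.map (·.1)).Nodup
instance (deps : List (String × String)) : Decidable (Pre_count_external_deps_py deps) := by unfold Pre_count_external_deps_py; infer_instance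
def pvWitness_count_external_deps_py : (List (String × String)) := [("os", "1.0"), ("numpy", "2.1")]

def Spec_count_external_deps_py (deps : List (String × String)) (out : Int) : Prop := out = count_external_deps_py_alt deps
instance (deps : List (String × String)) (out : Int) : Decidable (Spec_count_external_deps_py deps out) := by unfold Spec_count_external_deps_py; infer_instance

-- ===== CLAIM (what is proved, stated in full; the proofs are below) =====
def Claim_equal_count_external_deps_py : Prop := ∀ (deps : List (String × String)), Dom_count_external_deps_py deps → Pre_count_external_deps_py deps → Spec_count_external_deps_py deps (count_external_deps_py deps)

-- ===== LEMMAS AND PROOFS =====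

-- the conditional-increment fold counts the elements satisfying the test
theorem pv_foldl_count {α : Type} (p : α → Bool) (L : List α) :
    ∀ c : Int, L.foldl (fun c m => if p m then c + 1 else c) c
      = c + ((L.filter p).length : Int) := by
  induction L with
  | nil => intro c; simp
  | cons a t ih =>
    intro c
    by_cases h : p a = true
    · simp [h, ih]; ring
    · simp [h, ih]

-- for duplicate-free lists, |{x ∈ xs | x ∈ ys}| = |{y ∈ ys | y ∈ xs}| (both are |xs ∩ ys|)
theorem pv_filter_mem_length_comm {α : Type} [DecidableEq α] (xs ys : List α)
    (hx : xs.Nodup) (hy : ys.Nodup) :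
    (xs.filter (fun a => a ∈ ys)).length = (ys.filter (fun a => a ∈ xs)).length := by
  have h1 : (xs.filter (fun a => a ∈ ys)).length = (xs.toFinset ∩ ys.toFinset).card := by
    rw [← List.toFinset_card_of_nodup (hx.filter _), List.toFinset_filter]
    congr 1
    ext a
    simp
  have h2 : (ys.filter (fun a => a ∈ xs)).length = (ys.toFinset ∩ xs.toFinset).card := by
    rw [← List.toFinset_card_of_nodup (hy.filter _), List.toFinset_filter]
    congr 1
    ext a
    simp
  rw [h1, h2, Finset.inter_comm]

-- ===== VERDICT (by name: the statement is the Claim_ definition above) =====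
theorem count_external_deps_py_spec : Claim_equal_count_external_deps_py := by
  intro deps _ hpre
  unfold Spec_count_external_deps_py count_external_deps_py count_external_deps_py_alt
  rw [pv_foldl_count]
  have hstd : (pvStdlibMods : List String).Nodup := by decide
  have hmemb : ∀ m : String, ((PySem.Dict.mk deps).contains m) = decide (m ∈ deps.map (·.1)) := by
    intro m
    simp [PySem.Dict.contains_eq_decide_mem_keys, PySem.Dict.keys]
  have hcongr :
      (pvStdlibMods.filter (fun m => (PySem.Dict.mk deps).contains m)).length
        = (pvStdlibMods.filter (fun m => m ∈ deps.map (·.1))).length := by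
    congr 1
    apply List.filter_congr
    intro m _
    simp [hmemb m]
  have hkey :
      (pvStdlibMods.filter (fun m => m ∈ deps.map (·.1))).length
        = ((deps.map (·.1)).filter (fun d => d ∈ (pvStdlibMods : List String))).length :=
    pv_filter_mem_length_comm _ _ hstd hpre
  have hsplit := (List.length_eq_length_filter_add (l := deps.map (·.1))
      (fun d => pvStdlibMods.contains d)).symm
  have hlen : (deps.map (·.1)).length = deps.length := List.length_map ..
  have hcont :
      ((deps.map (·.1)).filter (fun d => d ∈ (pvStdlibMods : List String))).length
        = ((deps.map (·.1)).filter (fun d => pvStdlibMods.contains d)).length := by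
    congr 1
    apply List.filter_congr
    intro d _
    simp [PySem.Set.contains]
  simp only [hcongr, hkey, hcont] at *
  omega
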